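-- pv_equiv track=rewrite | github.com/UTAustin-SwarmLab/Neuro-Symbolic-Video-Search-Temporal-Logic | execute_demo_v2.py | _format_prop_ranges_dict
-- ===== SOURCE A (Python) =====
-- from typing import Dict, List, Iterable, Tuple
--
-- def _format_prop_ranges_dict(prop_matrix: Dict[str, List[int]]) -> str:
--     def group_into_ranges(frames: Iterable[int]) -> List[Tuple[int, int]]:
--         f = sorted(set(int(x) for x in frames))
--         if not f:
--             return []
--         ranges: List[Tuple[int, int]] = []
--         s = p = f[0]
--         for x in f[1:]:
--             if x == p + 1:
--                 p = x
--             else: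
--                 ranges.append((s, p))   # inclusive end for display
--                 s = p = x
--         ranges.append((s, p))
--         return ranges
--
--     detections = {}
--     for prop, frames in prop_matrix.items():
--         ranges = group_into_ranges(frames)
--         detections[prop] = ranges
--     return detections
-- ===== SOURCE B (Python) =====
-- from typing import Dict, List, Iterable, Tuple
--
-- def _format_prop_ranges_dict(prop_matrix: Dict[str, List[int]]) -> str:
--     # Boundary-detection algorithm: a frame starts a range iff its predecessor is
--     # absent from the set, ends one iff its successor is absent; zip the sorted
--     # boundary lists. No linear run scan at all.
--     def group_into_ranges(frames: Iterable[int]) -> List[Tuple[int, int]]: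
--         s = {int(x) for x in frames}
--         starts = sorted(x for x in s if x - 1 not in s)
--         ends = sorted(x for x in s if x + 1 not in s)
--         return list(zip(starts, ends))
--     return {prop: group_into_ranges(frames) for prop, frames in prop_matrix.items()}
-- ===== Notes on version B (the rewrite author's own statement) =====
-- stated objective: alternative
-- what changed: The helper's sequential start/prev run scan is replaced by a boundary-detection algorithm: a frame is a range start iff x-1 is not in the frame set and a range end iff x+1 is not, so B filters the set twice by membership, sorts each boundary list, and zips starts with ends; no linear scan over consecutive runs exists in B.
import Mathlib
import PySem

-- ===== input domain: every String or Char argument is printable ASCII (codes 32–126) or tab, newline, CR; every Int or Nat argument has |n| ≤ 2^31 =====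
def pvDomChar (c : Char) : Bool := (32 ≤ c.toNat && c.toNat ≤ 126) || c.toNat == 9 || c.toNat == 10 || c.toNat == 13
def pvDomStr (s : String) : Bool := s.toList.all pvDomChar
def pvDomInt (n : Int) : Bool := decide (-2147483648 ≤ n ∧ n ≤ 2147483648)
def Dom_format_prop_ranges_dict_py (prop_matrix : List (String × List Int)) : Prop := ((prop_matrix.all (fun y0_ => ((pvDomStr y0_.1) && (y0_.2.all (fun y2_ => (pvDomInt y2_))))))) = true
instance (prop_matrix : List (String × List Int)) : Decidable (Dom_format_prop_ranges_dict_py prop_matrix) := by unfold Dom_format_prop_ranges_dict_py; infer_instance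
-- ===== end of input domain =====

-- B replaces the helper's start/prev run scan by boundary detection: filter the frame set
-- for elements whose predecessor (resp. successor) is absent, sort both boundary lists, zip
-- them (alternative algorithm; same cost, same return value).


-- ===== PORT A =====
-- helper group_into_ranges of A: sorted(set(frames)); start/prev scan carried through a fold
def pvRangesA (frames : List Int) : List (Int × Int) :=
  let f := PySem.List.sorted (PySem.Set.ofList frames) (fun x => x) false
  match f with
  | [] => []
  | h :: t =>
    let st := t.foldl
      (fun (acc : List (Int × Int) × Int × Int) x =>
        if x = acc.2.2 + 1 then (acc.1, acc.2.1, x)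
        else (acc.1 ++ [(acc.2.1, acc.2.2)], x, x))
      ([], h, h)
    st.1 ++ [(st.2.1, st.2.2)]

def format_prop_ranges_dict_py (prop_matrix : List (String × List Int)) : List (String × List (Int × Int)) :=
  (prop_matrix.foldl (fun (d : PySem.Dict String (List (Int × Int))) pf =>
      d.insert pf.1 (pvRangesA pf.2)) PySem.Dict.empty).items

-- ===== PORT B =====
-- helper group_into_ranges of B: boundary detection on the frame set; zip of sorted starts/ends
def pvRangesB (frames : List Int) : List (Int × Int) :=
  let s := PySem.Set.ofList frames
  let starts := PySem.List.sorted (s.filter (fun x => !decide ((x - 1) ∈ s))) (fun x => x) false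
  let ends := PySem.List.sorted (s.filter (fun x => !decide ((x + 1) ∈ s))) (fun x => x) false
  starts.zip ends

def format_prop_ranges_dict_py_alt (prop_matrix : List (String × List Int)) : List (String × List (Int × Int)) :=
  (prop_matrix.foldl (fun (d : PySem.Dict String (List (Int × Int))) pf =>
      d.insert pf.1 (pvRangesB pf.2)) PySem.Dict.empty).items

-- ===== PRECONDITION & SPEC =====
def Spec_format_prop_ranges_dict_py (prop_matrix : List (String × List Int)) (out : List (String × List (Int × Int))) : Prop := out = format_prop_ranges_dict_py_alt prop_matrix
instance (prop_matrix : List (String × List Int)) (out : List (String × List (Int × Int))) : Decidable (Spec_format_prop_ranges_dict_py prop_matrix out) := by unfold Spec_format_prop_ranges_dict_py; infer_instance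

-- ===== CLAIM =====
def Claim_equal_format_prop_ranges_dict_py : Prop := ∀ (prop_matrix : List (String × List Int)), Dom_format_prop_ranges_dict_py prop_matrix → Spec_format_prop_ranges_dict_py prop_matrix (format_prop_ranges_dict_py prop_matrix)

-- ===== LEMMAS AND PROOFS =====

-- canonical recursive description of consecutive-run grouping, scanning t with current run (s, p)
def pvRunsFrom (s p : Int) : List Int → List (Int × Int)
  | [] => [(s, p)]
  | x :: t => if x = p + 1 then pvRunsFrom s x t else (s, p) :: pvRunsFrom x x t

-- inner range-starts of a strictly increasing chain headed by p
def pvSAdj (p : Int) : List Int → List Int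
  | [] => []
  | x :: t => if x = p + 1 then pvSAdj x t else x :: pvSAdj x t

-- range-ends of a strictly increasing chain headed by p
def pvEAdj (p : Int) : List Int → List Int
  | [] => [p]
  | x :: t => if x = p + 1 then pvEAdj x t else p :: pvEAdj x t

-- A's fold equals the canonical description
theorem pvScanA_spec (t : List Int) (r : List (Int × Int)) (s p : Int) :
    (t.foldl
      (fun (acc : List (Int × Int) × Int × Int) x =>
        if x = acc.2.2 + 1 then (acc.1, acc.2.1, x)
        else (acc.1 ++ [(acc.2.1, acc.2.2)], x, x))
      (r, s, p)).1
      ++ [((t.foldl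
      (fun (acc : List (Int × Int) × Int × Int) x =>
        if x = acc.2.2 + 1 then (acc.1, acc.2.1, x)
        else (acc.1 ++ [(acc.2.1, acc.2.2)], x, x))
      (r, s, p)).2.1,
          (t.foldl
      (fun (acc : List (Int × Int) × Int × Int) x =>
        if x = acc.2.2 + 1 then (acc.1, acc.2.1, x)
        else (acc.1 ++ [(acc.2.1, acc.2.2)], x, x))
      (r, s, p)).2.2)]
      = r ++ pvRunsFrom s p t := by
  induction t generalizing r s p with
  | nil => simp [pvRunsFrom]
  | cons x t ih =>
    simp only [List.foldl_cons, pvRunsFrom]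
    by_cases hx : x = p + 1
    · simp only [hx, if_true]
      exact ih r s (p + 1)
    · simp only [if_neg hx]
      rw [ih (r ++ [(s, p)]) x x]
      simp

-- the canonical runs project to the boundary chains
theorem pvRuns_fst (t : List Int) (s p : Int) :
    (pvRunsFrom s p t).map Prod.fst = s :: pvSAdj p t := by
  induction t generalizing s p with
  | nil => simp [pvRunsFrom, pvSAdj]
  | cons x t ih =>
    simp only [pvRunsFrom, pvSAdj]
    by_cases hx : x = p + 1
    · simp only [if_pos hx]; exact ih s x
    · simp only [if_neg hx, List.map_cons]; rw [ih x x]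

theorem pvRuns_snd (t : List Int) (s p : Int) :
    (pvRunsFrom s p t).map Prod.snd = pvEAdj p t := by
  induction t generalizing s p with
  | nil => simp [pvRunsFrom, pvEAdj]
  | cons x t ih =>
    simp only [pvRunsFrom, pvEAdj]
    by_cases hx : x = p + 1
    · simp only [if_pos hx]; exact ih s x
    · simp only [if_neg hx, List.map_cons]; rw [ih x x]

-- zip of the two projections restores the pair list
theorem pvZip_proj {α β : Type} (l : List (α × β)) :
    (l.map Prod.fst).zip (l.map Prod.snd) = l := by
  induction l with
  | nil => rfl
  | cons a l ih => simp [List.zip]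

-- filtering a strictly increasing chain by "predecessor absent from F" yields the inner starts
theorem pvFiltS (F : List Int) (p : Int) (t : List Int)
    (hpw : (p :: t).Pairwise (· < ·))
    (hmem : ∀ z ∈ t, ((z - 1) ∈ F ↔ z - 1 = p ∨ (z - 1) ∈ t)) :
    t.filter (fun x => !decide ((x - 1) ∈ F)) = pvSAdj p t := by
  induction t generalizing p with
  | nil => rfl
  | cons x t ih =>
    have hpx : p < x := (List.pairwise_cons.1 hpw).1 x (by simp)
    have hxt : ∀ z ∈ t, x < z := (List.pairwise_cons.1 (List.pairwise_cons.1 hpw).2).1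
    have hx_mem : (x - 1) ∈ F ↔ x = p + 1 := by
      rw [hmem x (by simp)]
      constructor
      · rintro (h | h)
        · omega
        · rcases List.mem_cons.1 h with h | h
          · omega
          · exact absurd (hxt _ h) (by omega)
      · intro h; left; omega
    have hmem' : ∀ z ∈ t, ((z - 1) ∈ F ↔ z - 1 = x ∨ (z - 1) ∈ t) := by
      intro z hz
      rw [hmem z (by simp [hz])]
      have hxz : x < z := hxt z hz
      constructor
      · rintro (h | h)
        · omega
        · rcases List.mem_cons.1 h with h | h
          · left; exact h
          · right; exact h
      · rintro (h | h)
        · right; simp [h]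
        · right; simp [h]
    have hpw' : (x :: t).Pairwise (· < ·) := (List.pairwise_cons.1 hpw).2
    simp only [pvSAdj]
    by_cases hx : x = p + 1
    · have hin : ((x - 1) ∈ F) := hx_mem.2 hx
      rw [if_pos hx, List.filter_cons_of_neg (by simp [hin])]
      exact ih x hpw' hmem'
    · have hout : ¬ ((x - 1) ∈ F) := fun h => hx (hx_mem.1 h)
      rw [if_neg hx, List.filter_cons_of_pos (by simp [hout])]
      rw [ih x hpw' hmem']

-- filtering a strictly increasing chain by "successor absent from F" yields the range ends
theorem pvFiltE (F : List Int) (p : Int) (t : List Int)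
    (hpw : (p :: t).Pairwise (· < ·))
    (hmem : ∀ z ∈ p :: t, ((z + 1) ∈ F ↔ (z + 1) ∈ p :: t)) :
    (p :: t).filter (fun x => !decide ((x + 1) ∈ F)) = pvEAdj p t := by
  induction t generalizing p with
  | nil =>
    have hp : ¬ ((p + 1) ∈ F) := by
      intro h
      have := (hmem p (by simp)).1 h
      simp at this
    rw [List.filter_cons_of_pos (by simp [hp])]
    rfl
  | cons x t ih =>
    have hpx : p < x := (List.pairwise_cons.1 hpw).1 x (by simp)
    have hxt : ∀ z ∈ t, x < z := (List.pairwise_cons.1 (List.pairwise_cons.1 hpw).2).1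
    have hp_mem : (p + 1) ∈ F ↔ x = p + 1 := by
      rw [hmem p (by simp)]
      constructor
      · intro h
        rcases List.mem_cons.1 h with h | h
        · omega
        · rcases List.mem_cons.1 h with h | h
          · omega
          · exact absurd (hxt _ h) (by omega)
      · intro h; simp [h]
    have hmem' : ∀ z ∈ x :: t, ((z + 1) ∈ F ↔ (z + 1) ∈ x :: t) := by
      intro z hz
      have hz' : p < z := by
        rcases List.mem_cons.1 hz with h | h
        · omega
        · have := hxt z h; omega
      rw [hmem z (by simp [List.mem_cons.1 hz])]
      constructor
      · intro h
        rcases List.mem_cons.1 h with h | h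
        · omega
        · exact h
      · intro h
        exact List.mem_cons.2 (Or.inr h)
    have hpw' : (x :: t).Pairwise (· < ·) := (List.pairwise_cons.1 hpw).2
    have hrest := ih x hpw' hmem'
    simp only [pvEAdj]
    by_cases hx : x = p + 1
    · have hin : ((p + 1) ∈ F) := hp_mem.2 hx
      rw [if_pos hx, List.filter_cons_of_neg (by simp [hin])]
      exact hrest
    · have hout : ¬ ((p + 1) ∈ F) := fun h => hx (hp_mem.1 h)
      rw [if_neg hx, List.filter_cons_of_pos (by simp [hout])]
      rw [hrest]

-- sorting the set-filter equals filtering the sorted set (both strictly increasing, same elements)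
theorem pvSortFilter (frames : List Int) (P : Int → Bool) :
    PySem.List.sorted ((PySem.Set.ofList frames).filter P) (fun x => x) false
      = (PySem.List.sorted (PySem.Set.ofList frames) (fun x => x) false).filter P := by
  apply PySem.List.sorted_eq_of_perm_of_pairwise_lt
  · exact ((PySem.List.sorted_perm _ _ _).filter P)
  · exact List.Pairwise.sublist List.filter_sublist (PySem.List.sorted_ofList_pairwise_lt frames)

-- the two helpers agree on every frames list
theorem pvRanges_eq (frames : List Int) : pvRangesA frames = pvRangesB frames := by
  unfold pvRangesA pvRangesB
  simp only [pvSortFilter]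
  have hpred : ∀ (c : Int), decide (c ∈ PySem.Set.ofList frames)
      = decide (c ∈ PySem.List.sorted (PySem.Set.ofList frames) (fun x => x) false) := by
    intro c
    apply decide_eq_decide.2
    exact ((PySem.List.sorted_perm _ _ _).mem_iff).symm
  have hfilt : ∀ (g : Int → Int),
      (fun x => !decide ((g x) ∈ PySem.Set.ofList frames))
        = (fun x => !decide ((g x) ∈ PySem.List.sorted (PySem.Set.ofList frames) (fun x => x) false)) := by
    intro g; funext x; rw [hpred]
  have h1 := hfilt (fun x => x - 1)
  have h2 := hfilt (fun x => x + 1)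
  simp only [h1, h2]
  have hpw := PySem.List.sorted_ofList_pairwise_lt frames
  cases hm : PySem.List.sorted (PySem.Set.ofList frames) (fun x => x) false with
  | nil => rfl
  | cons h t =>
    rw [hm] at hpw
    have hlt : ∀ z ∈ t, h < z := (List.pairwise_cons.1 hpw).1
    -- starts: head h survives (h-1 is below every element), tail filtered = pvSAdj h t
    have hhead : ¬ ((h - 1) ∈ h :: t) := by
      intro hc
      rcases List.mem_cons.1 hc with hc | hc
      · omega
      · exact absurd (hlt _ hc) (by omega)
    have hstarts : (h :: t).filter (fun x => !decide ((x - 1) ∈ h :: t)) = h :: pvSAdj h t := by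
      rw [List.filter_cons_of_pos (by simp [hhead])]
      rw [pvFiltS (h :: t) h t hpw (fun z _ => by simp [List.mem_cons])]
    have hends : (h :: t).filter (fun x => !decide ((x + 1) ∈ h :: t)) = pvEAdj h t :=
      pvFiltE (h :: t) h t hpw (fun z _ => Iff.rfl)
    rw [hstarts, hends]
    simp only []
    rw [pvScanA_spec t [] h h, List.nil_append]
    rw [← pvRuns_fst t h h, ← pvRuns_snd t h h, pvZip_proj]

-- ===== VERDICT =====
theorem format_prop_ranges_dict_py_spec : Claim_equal_format_prop_ranges_dict_py := by
  intro pm _dom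
  unfold Spec_format_prop_ranges_dict_py format_prop_ranges_dict_py format_prop_ranges_dict_py_alt
  have hfun : (fun (d : PySem.Dict String (List (Int × Int))) (pf : String × List Int) =>
      d.insert pf.1 (pvRangesA pf.2))
      = (fun (d : PySem.Dict String (List (Int × Int))) pf =>
      d.insert pf.1 (pvRangesB pf.2)) := by
    funext d pf; rw [pvRanges_eq]
  rw [hfun]
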